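-- pv_equiv track=rewrite | github.com/BenAladjem/SoftUni-Software-Engienering | Python Advanced Module/lists_as_stacks_and_queue_exercise/truck_tour.py | check
-- ===== SOURCE A (Python) =====
-- def check(arri):
--     flag_check = True
--     l = len(arri)
--     r = 0
--     for i in range(l):
--         r += arri[i][0] - arri[i][1]
--         if r < 0:
--             flag_check = False
--     return flag_check
-- ===== SOURCE B (Python) =====
-- def check(arri):
--     # Divide and conquer: a segment is summarised by (total, minpref), where
--     # minpref = minimum over all (possibly empty) prefix sums of the segment's
--     # deltas.  minpref(L ++ R) = min(minpref L, total L + minpref R).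
--     # All running sums stay nonnegative iff minpref of the whole list is >= 0.
--     def solve(lo, hi):
--         if hi <= lo:
--             return (0, 0)
--         if hi - lo == 1:
--             d = arri[lo][0] - arri[lo][1]
--             return (d, min(0, d))
--         mid = (lo + hi) // 2
--         tl, ml = solve(lo, mid)
--         tr, mr = solve(mid, hi)
--         return (tl + tr, min(ml, tl + mr))
--     return solve(0, len(arri))[1] >= 0
-- ===== Notes on version B (the rewrite author's own statement) =====
-- stated objective: alternative
-- what changed: Replaces A's linear flag-carrying scan by a divide-and-conquer recursion that summarises each half-segment as (total, minimum prefix sum) and merges the summaries, returning whether the whole list's minimum prefix sum is nonnegative.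
import Mathlib
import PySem

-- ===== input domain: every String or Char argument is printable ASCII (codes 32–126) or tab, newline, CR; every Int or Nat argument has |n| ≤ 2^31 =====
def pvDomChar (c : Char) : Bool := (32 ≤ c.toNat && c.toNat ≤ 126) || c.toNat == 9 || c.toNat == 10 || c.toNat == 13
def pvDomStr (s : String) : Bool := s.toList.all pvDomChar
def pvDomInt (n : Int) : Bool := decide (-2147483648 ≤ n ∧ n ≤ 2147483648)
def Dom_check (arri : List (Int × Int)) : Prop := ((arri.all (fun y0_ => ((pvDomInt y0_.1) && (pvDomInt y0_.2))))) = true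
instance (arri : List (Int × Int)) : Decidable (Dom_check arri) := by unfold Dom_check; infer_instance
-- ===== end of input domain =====

-- B (alternative): divide-and-conquer on index segments, summarising each half as
-- (total, minimum prefix sum) and merging, instead of A's flag-carrying linear scan.
-- Return values agree on all inputs.

-- ===== PORT A =====
-- literal port of A: loop over the elements carrying (flag_check, r)
def check (arri : List (Int × Int)) : Bool :=
  (arri.foldl
    (fun (s : Bool × Int) a =>
      let r := s.2 + (a.1 - a.2)
      (if r < 0 then false else s.1, r))
    (true, 0)).1

-- ===== PORT B =====
-- literal port of Source B's inner `solve(lo, hi)`; arri[lo] is always in range when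
-- called from check_alt, so the `.getD (0, 0)` default is never used.
def solveSeg (arri : List (Int × Int)) (lo hi : Nat) : Int × Int :=
  if hi ≤ lo then (0, 0)
  else if hi - lo = 1 then
    let p := (PySem.List.pyGet? arri (lo : Int)).getD (0, 0)
    let d := p.1 - p.2
    (d, min 0 d)
  else
    let mid := (lo + hi) / 2
    let l := solveSeg arri lo mid
    let r := solveSeg arri mid hi
    (l.1 + r.1, min l.2 (l.1 + r.2))
termination_by hi - lo
decreasing_by all_goals omega

def check_alt (arri : List (Int × Int)) : Bool :=
  decide (0 ≤ (solveSeg arri 0 arri.length).2)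

-- ===== PRECONDITION & SPEC =====
def Spec_check (arri : List (Int × Int)) (out : Bool) : Prop := out = check_alt arri
instance (arri : List (Int × Int)) (out : Bool) : Decidable (Spec_check arri out) := by unfold Spec_check; infer_instance

-- ===== CLAIM (what is proved, stated in full; the proofs are below) =====
def Claim_equal_check : Prop := ∀ (arri : List (Int × Int)), Dom_check arri → Spec_check arri (check arri)

-- ===== LEMMAS AND PROOFS =====

-- minimum over all (possibly empty) prefix sums of a list of deltas
def mpD : List Int → Int
  | [] => 0
  | d :: t => min 0 (d + mpD t)

theorem mpD_nonpos (m : List Int) : mpD m ≤ 0 := by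
  cases m <;> simp [mpD]

-- mpD over a concatenation
theorem mpD_append (l r : List Int) :
    mpD (l ++ r) = min (mpD l) (l.sum + mpD r) := by
  induction l with
  | nil => simpa [mpD] using (min_eq_right (mpD_nonpos r)).symm
  | cons d t ih =>
    simp only [List.cons_append, mpD, ih, List.sum_cons]
    omega

-- "all nonempty running sums starting from r are nonnegative", as A checks them
def goodFrom : List Int → Int → Bool
  | [], _ => true
  | d :: t, r => (decide (0 ≤ r + d)) && goodFrom t (r + d)

-- A's fold computes flag && goodFrom
theorem check_fold_eq (l : List (Int × Int)) (flag : Bool) (r : Int) :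
    (l.foldl
      (fun (s : Bool × Int) a =>
        let r := s.2 + (a.1 - a.2)
        (if r < 0 then false else s.1, r))
      (flag, r)).1
    = (flag && goodFrom (l.map (fun a => a.1 - a.2)) r) := by
  induction l generalizing flag r with
  | nil => simp [goodFrom]
  | cons a t ih =>
    simp only [List.foldl_cons, List.map_cons, goodFrom]
    rw [ih]
    by_cases h : r + (a.1 - a.2) < 0
    · simp [show ¬(0 ≤ r + (a.1 - a.2)) by omega, h]
    · simp [show (0 ≤ r + (a.1 - a.2)) by omega, h]

-- shifting mpD by a starting sum r matches goodFrom
theorem mpD_shift (m : List Int) (r : Int) :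
    (0 ≤ r + mpD m) ↔ (0 ≤ r ∧ goodFrom m r = true) := by
  induction m generalizing r with
  | nil => simp [mpD, goodFrom]
  | cons d t ih =>
    simp only [mpD, goodFrom, Bool.and_eq_true, decide_eq_true_eq]
    have h := ih (r + d)
    constructor
    · intro hle
      refine ⟨by omega, ?_⟩
      have h2 : 0 ≤ (r + d) + mpD t := by omega
      exact h.mp h2
    · rintro ⟨h1, h2, h3⟩
      have := h.mpr ⟨h2, h3⟩
      omega

-- solveSeg computes (sum, mpD) of the delta slice [lo, hi)
theorem solveSeg_correct (arri : List (Int × Int)) (lo hi : Nat)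
    (hhi : hi ≤ arri.length) :
    solveSeg arri lo hi =
      ((((arri.map (fun a => a.1 - a.2)).drop lo).take (hi - lo)).sum,
       mpD (((arri.map (fun a => a.1 - a.2)).drop lo).take (hi - lo))) := by
  fun_induction solveSeg arri lo hi with
  | case1 lo hi h =>
    have : hi - lo = 0 := by omega
    simp [this, mpD]
  | case2 lo hi h h1 p d =>
    have hlo : lo < arri.length := by omega
    have hget : PySem.List.pyGet? arri (lo : Int) = some arri[lo] := by
      simp [PySem.List.pyGet?, PySem.List.pyIdx?, hlo]
    have hslice :
        ((arri.map (fun a => a.1 - a.2)).drop lo).take (hi - lo)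
          = [arri[lo].1 - arri[lo].2] := by
      rw [h1]
      rw [List.drop_eq_getElem_cons (by simpa using hlo)]
      simp
    rw [hslice]
    simp only [d, p, hget, Option.getD_some, mpD]
    simp
  | case3 lo hi h h1 mid l r ihl ihr =>
    have hm1 : lo ≤ mid := by omega
    have hm2 : mid ≤ hi := by omega
    simp only [l, r]
    rw [ihl (by omega), ihr hhi]
    have hsplit :
        ((arri.map (fun a => a.1 - a.2)).drop lo).take (hi - lo)
          = ((arri.map (fun a => a.1 - a.2)).drop lo).take (mid - lo)
            ++ ((arri.map (fun a => a.1 - a.2)).drop mid).take (hi - mid) := by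
      have he : hi - lo = (mid - lo) + (hi - mid) := by omega
      rw [he, List.take_add]
      congr 1
      rw [List.drop_drop]
      congr 2
      omega
    rw [hsplit, List.sum_append, mpD_append]

-- ===== VERDICT (by name: the statement is the Claim_ definition above) =====
theorem check_spec : Claim_equal_check := by
  intro arri _
  unfold Spec_check check check_alt
  have ht : List.take arri.length (arri.map (fun a => a.1 - a.2))
      = arri.map (fun a => a.1 - a.2) := List.take_of_length_le (by simp)
  rw [check_fold_eq]
  simp only [solveSeg_correct arri 0 arri.length (le_refl _), Nat.sub_zero,
    List.drop_zero, ht]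
  by_cases hm : (0 : Int) ≤ mpD (arri.map (fun a => a.1 - a.2))
  · have := (mpD_shift (arri.map (fun a => a.1 - a.2)) 0).mp (by omega)
    simp [this.2, hm]
  · have hg : goodFrom (arri.map (fun a => a.1 - a.2)) 0 = false := by
      cases hgg : goodFrom (arri.map (fun a => a.1 - a.2)) 0
      · rfl
      · exact absurd (by
          have := (mpD_shift (arri.map (fun a => a.1 - a.2)) 0).mpr ⟨le_refl 0, hgg⟩
          omega) hm
    simp [hg, hm]
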